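-- pv_equiv track=rewrite | github.com/manuvai/AOC_2024 | day1/main.py | extract_occurences
-- ===== SOURCE A (Python) =====
-- def extract_occurences(left_list, right_list):
--     map_occurences = {}
--     for el in left_list:
--         map_occurences[el] = 0
--
--     for el in right_list:
--         if (el in map_occurences):
--             map_occurences[el] += 1
--
--     return map_occurences
-- ===== SOURCE B (Python) =====
-- def extract_occurences(left_list, right_list):
--     return {el: right_list.count(el) for el in left_list}
-- ===== Notes on version B (the rewrite author's own statement) =====
-- stated objective: simpler
-- what changed: B keeps no counting table at all: it is a one-line dict comprehension that, for each left key, scans right_list with list.count (per-key nested scan), whereas A builds a dict and increments it in a single hash-counting pass over right_list.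
import Mathlib
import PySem

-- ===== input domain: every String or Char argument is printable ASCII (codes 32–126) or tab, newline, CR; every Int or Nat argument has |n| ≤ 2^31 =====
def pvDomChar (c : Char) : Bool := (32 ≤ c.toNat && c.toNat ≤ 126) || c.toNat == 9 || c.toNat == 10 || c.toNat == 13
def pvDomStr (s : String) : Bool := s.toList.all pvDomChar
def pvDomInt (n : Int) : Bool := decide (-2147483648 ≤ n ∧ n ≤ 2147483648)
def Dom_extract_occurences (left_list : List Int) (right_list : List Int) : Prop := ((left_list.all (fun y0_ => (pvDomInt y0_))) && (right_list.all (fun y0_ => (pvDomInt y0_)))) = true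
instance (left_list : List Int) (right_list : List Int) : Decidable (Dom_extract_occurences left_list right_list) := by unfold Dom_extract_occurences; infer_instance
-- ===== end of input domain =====

-- B keeps no counting table: it maps each left key to right_list.count(el) by a per-key scan of right_list (a dict comprehension); same result, simpler code, O(n*m) instead of A's O(n+m).

-- ===== PORT A =====
def extract_occurences (left_list : List Int) (right_list : List Int) : List (Int × Int) :=
  let m0 : PySem.Dict Int Int := left_list.foldl (fun d el => d.insert el 0) PySem.Dict.empty
  let m1 : PySem.Dict Int Int :=
    right_list.foldl (fun d el => if d.contains el then d.modify el 0 (· + 1) else d) m0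
  m1.items

-- ===== PORT B =====
def extract_occurences_alt (left_list : List Int) (right_list : List Int) : List (Int × Int) :=
  (left_list.foldl
    (fun d el => d.insert el ((PySem.List.count right_list el : Int)))
    PySem.Dict.empty).items

-- ===== PRECONDITION & SPEC =====
def Spec_extract_occurences (left_list : List Int) (right_list : List Int) (out : List (Int × Int)) : Prop := out = extract_occurences_alt left_list right_list
instance (left_list : List Int) (right_list : List Int) (out : List (Int × Int)) : Decidable (Spec_extract_occurences left_list right_list out) := by unfold Spec_extract_occurences; infer_instance

-- ===== CLAIM (what is proved, stated in full; the proofs are below) =====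
def Claim_equal_extract_occurences : Prop := ∀ (left_list : List Int) (right_list : List Int), Dom_extract_occurences left_list right_list → Spec_extract_occurences left_list right_list (extract_occurences left_list right_list)

-- ===== LEMMAS AND PROOFS =====

-- A's counting loop never changes the key list.
theorem keysA (rl : List Int) (d : PySem.Dict Int Int) :
    (rl.foldl (fun d el => if d.contains el then d.modify el 0 (· + 1) else d) d).keys = d.keys := by
  induction rl generalizing d with
  | nil => rfl
  | cons x xs ih =>
      simp only [List.foldl_cons]
      by_cases h : d.contains x = true
      · rw [if_pos h, ih]
        rw [PySem.Dict.keys_modify, PySem.Dict.keys_insert_of_contains _ _ h]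
      · simp only [Bool.not_eq_true] at h
        simp [h, ih]

-- A's counting loop: a key already present ends up with its value plus its count in rl.
theorem getDA (rl : List Int) (d : PySem.Dict Int Int) (k : Int) (hk : d.contains k = true) :
    (rl.foldl (fun d el => if d.contains el then d.modify el 0 (· + 1) else d) d).getD k 0
      = d.getD k 0 + rl.count k := by
  induction rl generalizing d with
  | nil => simp
  | cons x xs ih =>
      simp only [List.foldl_cons, List.count_cons]
      by_cases h : d.contains x = true
      · rw [if_pos h, ih _ (by simp [PySem.Dict.contains_modify, hk])]
        rw [PySem.Dict.getD_modify]
        by_cases hkx : k = x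
        · subst hkx; simp; ring
        · simp [hkx, Ne.symm hkx]
      · simp only [Bool.not_eq_true] at h
        rw [if_neg (by simp [h]), ih _ hk]
        have hkx : ¬ (x = k) := fun he => by subst he; rw [hk] at h; cases h
        simp [hkx]

-- B's building loop: every inserted value is c el, so any key of the result reads back c k.
theorem getDB (l : List Int) (c : Int → Int) (d : PySem.Dict Int Int) (k : Int) :
    (l.foldl (fun d el => d.insert el (c el)) d).getD k 0
      = if k ∈ l then c k else d.getD k 0 := by
  induction l generalizing d with
  | nil => simp
  | cons x xs ih =>
      simp only [List.foldl_cons, ih, List.mem_cons]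
      by_cases hm : k ∈ xs
      · simp [hm]
      · by_cases hkx : k = x
        · subst hkx; simp [hm, PySem.Dict.getD_insert_self]
        · rw [PySem.Dict.getD_insert_of_ne d (c x) 0 hkx]
          simp [hm, hkx]

-- ===== VERDICT (by name: the statement is the Claim_ definition above) =====
theorem extract_occurences_spec : Claim_equal_extract_occurences := by
  intro ll rl _
  unfold Spec_extract_occurences extract_occurences extract_occurences_alt
  set m0 : PySem.Dict Int Int := ll.foldl (fun d el => d.insert el 0) PySem.Dict.empty with hm0
  set m1 : PySem.Dict Int Int :=
    rl.foldl (fun d el => if d.contains el then d.modify el 0 (· + 1) else d) m0 with hm1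
  set mB : PySem.Dict Int Int :=
    ll.foldl (fun d el => d.insert el ((PySem.List.count rl el : Int))) PySem.Dict.empty with hmB
  have hnd0 : m0.keys.Nodup := by
    rw [hm0]; exact PySem.Dict.nodup_keys_foldl_insert _ _ _ PySem.Dict.nodup_keys_empty
  have hkeys0 : m0.keys = PySem.Set.update ([] : List Int) ll := by
    rw [hm0, PySem.Dict.keys_foldl_insert]; simp [PySem.Dict.keys_empty]
  have hkeys1 : m1.keys = m0.keys := keysA rl m0
  have hndB : mB.keys.Nodup := by
    rw [hmB]; exact PySem.Dict.nodup_keys_foldl_insert _ _ _ PySem.Dict.nodup_keys_empty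
  have hkeysB : mB.keys = m0.keys := by
    rw [hmB, hkeys0, PySem.Dict.keys_foldl_insert]; simp [PySem.Dict.keys_empty]
  rw [PySem.Dict.items_eq_map_keys m1 (hkeys1 ▸ hnd0) 0,
      PySem.Dict.items_eq_map_keys mB hndB 0, hkeys1, hkeysB]
  apply List.map_congr_left
  intro k hk
  have hcont : m0.contains k = true := (PySem.Dict.contains_iff_mem_keys m0 k).2 hk
  have hmem : k ∈ ll := by
    have h' := hkeys0 ▸ hk
    simpa using (PySem.Set.mem_update _ _ _).1 h'
  have h0 : m0.getD k 0 = 0 := by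
    rw [hm0, getDB ll (fun _ => (0 : Int)) PySem.Dict.empty k]
    simp [hmem]
  rw [hm1, getDA rl m0 k hcont, h0, hmB,
      getDB ll (fun el => ((PySem.List.count rl el : Int))) PySem.Dict.empty k,
      if_pos hmem, PySem.List.count_eq]
  simp
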